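-- pv_equiv track=rewrite | github.com/JinHyeokPark28/Pathcraft-AI | src/PathcraftAI.Parser/passive_tree_analyzer.py | _get_priority_focus
-- ===== SOURCE A (Python) =====
-- from typing import Dict, List, Set, Tuple
--
-- def _get_priority_focus(nodes: List[Dict]) -> str:
--     """주요 포커스 카테고리 반환"""
--     if not nodes:
--         return "None"
--
--     # 가장 많은 카테고리 찾기
--     categories = {}
--     for node in nodes:
--         cat = node['category']
--         categories[cat] = categories.get(cat, 0) + 1
--
--     max_cat = max(categories.items(), key=lambda x: x[1])
--     return max_cat[0]
-- ===== SOURCE B (Python) =====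
-- def _get_priority_focus(nodes):
--     """Most frequent 'category' among nodes; first occurrence wins ties.
--
--     Counts by sorting the categories and measuring runs, then returns the
--     first category (in node order) whose count equals the maximum run length.
--     """
--     if not nodes:
--         return "None"
--     cats = [n['category'] for n in nodes]
--     s = sorted(cats)
--     counts = {}
--     i = 0
--     while i < len(s):
--         j = i
--         while j < len(s) and s[j] == s[i]:
--             j += 1
--         counts[s[i]] = j - i
--         i = j
--     m = max(counts.values())
--     for c in cats:
--         if counts[c] == m:
--             return c
-- ===== Notes on version B (the rewrite author's own statement) =====
-- stated objective: alternative
-- what changed: Replaces A's incremental frequency dictionary and items arg-max with a sort-then-scan algorithm: sort the categories, run-length-encode the runs into counts, take the maximum run length, and return the first category in node order attaining it.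
import Mathlib
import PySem

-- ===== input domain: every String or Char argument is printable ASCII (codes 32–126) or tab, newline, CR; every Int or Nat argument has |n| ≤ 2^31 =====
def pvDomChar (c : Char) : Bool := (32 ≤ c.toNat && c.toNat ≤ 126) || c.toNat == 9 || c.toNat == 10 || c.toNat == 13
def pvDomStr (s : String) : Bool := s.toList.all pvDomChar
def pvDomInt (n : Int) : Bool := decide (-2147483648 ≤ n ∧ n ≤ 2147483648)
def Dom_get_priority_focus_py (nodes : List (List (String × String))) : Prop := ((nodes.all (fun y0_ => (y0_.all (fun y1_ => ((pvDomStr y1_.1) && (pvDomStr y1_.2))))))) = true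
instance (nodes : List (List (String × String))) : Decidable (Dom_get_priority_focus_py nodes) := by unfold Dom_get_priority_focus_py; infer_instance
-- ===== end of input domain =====

-- B counts categories by sorting them and measuring runs, then returns the first
-- category (in node order) whose count equals the maximum; return value only.

-- ===== PORT A =====
-- node['category']; Pre_ guarantees the key exists (Python raises KeyError otherwise)
def pvCat (node : List (String × String)) : String :=
  ((PySem.Dict.mk node).get? "category").getD ""

def get_priority_focus_py (nodes : List (List (String × String))) : String :=
  if nodes = [] then "None"
  else
    let categories := nodes.foldl
      (fun d node =>
        let cat := pvCat node
        d.insert cat (d.getD cat 0 + 1))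
      (PySem.Dict.empty : PySem.Dict String Int)
    match PySem.List.max? categories.items (fun x => x.2) with
    | some m => m.1
    | none => ""   -- unreachable: categories is nonempty when nodes ≠ []

-- ===== PORT B =====
-- the two nested index `while` loops of Source B, ported as the equivalent structural
-- recursion on the sorted list: one outer step handles one run s[i:j]
-- (takeWhile = the inner `while s[j] == s[i]` advance, so j - i = 1 + length of takeWhile)
def pvRLE (s : List String) (d : PySem.Dict String Int) : PySem.Dict String Int :=
  match s with
  | [] => d
  | c :: t => pvRLE (t.dropWhile (· == c)) (d.insert c (1 + ((t.takeWhile (· == c)).length : Int)))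
termination_by s.length
decreasing_by
  simpa using Nat.lt_succ_of_le (List.length_dropWhile_le _ _)

def get_priority_focus_py_alt (nodes : List (List (String × String))) : String :=
  if nodes = [] then "None"
  else
    let cats := nodes.map pvCat
    let counts := pvRLE (PySem.List.sorted cats (fun x => x) false) PySem.Dict.empty
    match PySem.List.max? counts.values (fun v => v) with
    | none => ""   -- unreachable: counts is nonempty when nodes ≠ []
    | some m =>
      match cats.find? (fun c => counts.getD c 0 == m) with
      | some c => c
      | none => ""   -- unreachable: the max m is attained at some key, which is in cats

-- ===== PRECONDITION & SPEC =====
-- Pre_ excludes exactly the nodes lacking a 'category' key, on which Python A raises KeyError.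
def Pre_get_priority_focus_py (nodes : List (List (String × String))) : Prop :=
  (nodes.all (fun node => (PySem.Dict.mk node).contains "category")) = true
instance (nodes : List (List (String × String))) : Decidable (Pre_get_priority_focus_py nodes) := by unfold Pre_get_priority_focus_py; infer_instance

def pvWitness_get_priority_focus_py : (List (List (String × String))) :=
  [[("category", "damage")], [("category", "life")], [("category", "damage")]]

def Spec_get_priority_focus_py (nodes : List (List (String × String))) (out : String) : Prop := out = get_priority_focus_py_alt nodes
instance (nodes : List (List (String × String))) (out : String) : Decidable (Spec_get_priority_focus_py nodes out) := by unfold Spec_get_priority_focus_py; infer_instance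

-- ===== CLAIM (what is proved, stated in full; the proofs are below) =====
def Claim_equal_get_priority_focus_py : Prop := ∀ (nodes : List (List (String × String))), Dom_get_priority_focus_py nodes → Pre_get_priority_focus_py nodes → Spec_get_priority_focus_py nodes (get_priority_focus_py nodes)

-- ===== LEMMAS AND PROOFS =====

-- max? of a (k, f k) list keyed by .2 is max? of the keys keyed by f, paired up.
lemma foldl_max_map_pair (f : String → Int)
    (g : Option (String × Int) → (String × Int) → Option (String × Int))
    (g' : Option String → String → Option String)
    (hgn : ∀ x, g none x = some x)
    (hgs : ∀ m x, g (some m) x = if m.2 < x.2 then some x else some m)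
    (hg'n : ∀ x, g' none x = some x)
    (hg's : ∀ m x, g' (some m) x = if f m < f x then some x else some m)
    (l : List String) :
    ∀ acc : Option String,
      List.foldl g (acc.map (fun k => (k, f k))) (l.map (fun k => (k, f k)))
        = (List.foldl g' acc l).map (fun k => (k, f k)) := by
  induction l with
  | nil => intro acc; simp
  | cons x t ih =>
    intro acc
    cases acc with
    | none =>
      simpa [hgn, hg'n] using ih (some x)
    | some m =>
      simp only [List.map_cons, Option.map_some, List.foldl_cons, hgs, hg's]
      by_cases h : f m < f x
      · simpa [h] using ih (some x)
      · simpa [h] using ih (some m)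

lemma max?_map_pair (l : List String) (f : String → Int) :
    PySem.List.max? (l.map (fun k => (k, f k))) (fun x : String × Int => x.2)
      = (PySem.List.max? l f).map (fun k => (k, f k)) := by
  unfold PySem.List.max?
  exact foldl_max_map_pair f _ _ (fun x => rfl) (fun m x => rfl) (fun x => rfl) (fun m x => rfl) l none

-- find? over the running union fold behind PySem.Set.ofList
lemma pvFind?_foldl_add (p : String → Bool) :
    ∀ (l acc : List String),
      (List.foldl PySem.Set.add acc l).find? p = (acc.find? p).or (l.find? p) := by
  intro l
  induction l with
  | nil => intro acc; simp
  | cons x t ih =>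
    intro acc
    rw [List.foldl_cons]
    by_cases hmem : x ∈ acc
    · have hadd : PySem.Set.add acc x = acc := by
        simp [PySem.Set.add, hmem]
      rw [hadd, ih]
      cases hf : acc.find? p with
      | some v => simp
      | none =>
        have hpx : p x = false := by
          by_contra h
          have : p x = true := by simpa using h
          have := List.find?_isSome.mpr ⟨x, hmem, this⟩
          simp [hf] at this
        simp [hpx]
    · have hadd : PySem.Set.add acc x = acc ++ [x] := by
        simp [PySem.Set.add, hmem]
      rw [hadd, ih, List.find?_append]
      cases hpx : p x <;> simp [hpx]

-- Python's ordered dedup keeps first occurrences, so the first match is unchanged.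
lemma pvFind?_dedup (p : String → Bool) (l : List String) :
    (PySem.List.dedup l).find? p = l.find? p := by
  have := pvFind?_foldl_add p l []
  simpa [PySem.List.dedup, PySem.Set.ofList, PySem.Set.empty] using this

lemma pvFind?_congr {α : Type} (p q : α → Bool) :
    ∀ (l : List α), (∀ x ∈ l, p x = q x) → l.find? p = l.find? q := by
  intro l
  induction l with
  | nil => intro _; rfl
  | cons x t ih =>
    intro h
    have hx := h x (by simp)
    cases hq : q x with
    | true => simp [hx, hq]
    | false =>
      simp only [List.find?_cons, hx, hq]
      exact ih (fun y hy => h y (by simp [hy]))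

-- the running-max fold keeps the FIRST element attaining the maximum
lemma pvMaxGo {α : Type} (f : α → Int) :
    ∀ (t : List α) (m₀ m : α),
      List.foldl
        (fun acc x =>
          match acc with
          | none => some x
          | some m => if f m < f x then some x else some m)
        (some m₀) t = some m →
      (m = m₀ ∧ ∀ y ∈ t, ¬ f m₀ < f y) ∨
      (f m₀ < f m ∧ t.find? (fun y => decide (f m ≤ f y)) = some m) := by
  intro t
  induction t with
  | nil =>
    intro m₀ m h
    left
    refine ⟨by simpa using h.symm, by simp⟩
  | cons y t ih =>
    intro m₀ m h
    by_cases hy : f m₀ < f y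
    · have h' : List.foldl
          (fun acc x =>
            match acc with
            | none => some x
            | some m => if f m < f x then some x else some m)
          (some y) t = some m := by
        simpa [hy] using h
      rcases ih y m h' with ⟨rfl, hall⟩ | ⟨hlt, hfind⟩
      · right
        refine ⟨hy, ?_⟩
        simp
      · right
        refine ⟨lt_trans hy hlt, ?_⟩
        have hny : decide (f m ≤ f y) = false := by
          simp; omega
        simp [hny, hfind]
    · have h' : List.foldl
          (fun acc x =>
            match acc with
            | none => some x
            | some m => if f m < f x then some x else some m)
          (some m₀) t = some m := by
        simpa [hy] using h
      rcases ih m₀ m h' with ⟨rfl, hall⟩ | ⟨hlt, hfind⟩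
      · left
        refine ⟨rfl, ?_⟩
        intro z hz
        rcases List.mem_cons.mp hz with rfl | hz
        · exact hy
        · exact hall z hz
      · right
        refine ⟨hlt, ?_⟩
        have hny : decide (f m ≤ f y) = false := by
          simp; omega
        simp [hny, hfind]

-- max? returns the first element whose key attains the maximum
lemma pvMax?_find {α : Type} (f : α → Int) (l : List α) (m : α)
    (h : PySem.List.max? l f = some m) :
    l.find? (fun y => decide (f m ≤ f y)) = some m := by
  cases l with
  | nil => simp [PySem.List.max?] at h
  | cons x t =>
    have h' : List.foldl
        (fun acc y =>
          match acc with
          | none => some y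
          | some m => if f m < f y then some y else some m)
        (some x) t = some m := by
      simpa [PySem.List.max?, List.foldl_cons] using h
    rcases pvMaxGo f t x m h' with ⟨rfl, _⟩ | ⟨_, hfind⟩
    · simp
    · have hnx : decide (f m ≤ f x) = false := by simp; omega
      simp [hnx, hfind]

-- in a sorted list headed by c, everything after the initial run of c differs from c
lemma pvNotMemDrop (c : String) :
    ∀ (t : List String), (∀ x ∈ t, c ≤ x) → t.Pairwise (· ≤ ·) →
      c ∉ t.dropWhile (· == c) := by
  intro t
  induction t with
  | nil => intro _ _; simp
  | cons x t ih =>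
    intro hle hp
    by_cases hx : x == c
    · have : (x :: t).dropWhile (· == c) = t.dropWhile (· == c) := by
        simp [hx]
      rw [this]
      exact ih (fun y hy => hle y (by simp [hy])) (List.Pairwise.of_cons hp)
    · have : (x :: t).dropWhile (· == c) = x :: t := by
        simp only [List.dropWhile_cons]
        simp [hx]
      rw [this]
      intro hmem
      rcases List.mem_cons.mp hmem with rfl | hmem
      · simp at hx
      · have h1 : c ≤ x := hle x (by simp)
        have h2 : x ≤ c := (List.pairwise_cons.mp hp).1 c hmem
        have : x = c := le_antisymm h2 h1
        subst this
        simp at hx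

-- what the run-length fold looks up: the multiplicity in the sorted list
lemma pvRLE_getD (s : List String) (d : PySem.Dict String Int) :
    ∀ (x : String),
      s.Pairwise (· ≤ ·) →
      (pvRLE s d).getD x 0 = if x ∈ s then (s.count x : Int) else d.getD x 0 := by
  induction s, d using pvRLE.induct with
  | case1 d => intro x _; simp [pvRLE]
  | case2 d c t ih =>
    intro x hp
    have hle : ∀ y ∈ t, c ≤ y := (List.pairwise_cons.mp hp).1
    have ht : t.Pairwise (· ≤ ·) := (List.pairwise_cons.mp hp).2
    have ht2 : (t.dropWhile (· == c)).Pairwise (· ≤ ·) :=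
      ht.sublist (List.dropWhile_sublist _)
    have hcnot : c ∉ t.dropWhile (· == c) := pvNotMemDrop c t hle ht
    have htake : ∀ y ∈ t.takeWhile (· == c), y = c := by
      intro y hy
      have := List.mem_takeWhile_imp hy
      simpa using this
    have hsplit : t.takeWhile (· == c) ++ t.dropWhile (· == c) = t :=
      List.takeWhile_append_dropWhile
    rw [pvRLE, ih x ht2]
    by_cases hxc : x = c
    · subst hxc
      have hcount2 : (t.dropWhile (· == x)).count x = 0 :=
        List.count_eq_zero.mpr hcnot
      have hcount1 : (t.takeWhile (· == x)).count x = (t.takeWhile (· == x)).length :=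
        List.count_eq_length.mpr (fun b hb => by simp [htake b hb])
      have hct : t.count x = (t.takeWhile (· == x)).length := by
        calc t.count x = ((t.takeWhile (· == x)) ++ (t.dropWhile (· == x))).count x := by
              rw [hsplit]
          _ = (t.takeWhile (· == x)).length := by
              rw [List.count_append, hcount1, hcount2]
              omega
      simp [hcnot, List.count_cons_self, hct]
      omega
    · have hnt1 : x ∉ t.takeWhile (· == c) := fun h => hxc (htake x h)
      have hmemiff : x ∈ (c :: t) ↔ x ∈ t.dropWhile (· == c) := by
        constructor
        · intro h
          rcases List.mem_cons.mp h with rfl | h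
          · exact absurd rfl hxc
          · rw [← hsplit] at h
            rcases List.mem_append.mp h with h | h
            · exact absurd (htake x h) hxc
            · exact h
        · intro h
          refine List.mem_cons.mpr (Or.inr ?_)
          rw [← hsplit]
          exact List.mem_append.mpr (Or.inr h)
      have hcount1 : (t.takeWhile (· == c)).count x = 0 := List.count_eq_zero.mpr hnt1
      have hct : (c :: t).count x = (t.dropWhile (· == c)).count x := by
        have h1 : t.count x = (t.dropWhile (· == c)).count x := by
          conv_lhs => rw [← hsplit]
          rw [List.count_append, hcount1]
          omega
        have h2 : c ≠ x := fun h => hxc h.symm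
        rw [List.count_cons, h1]
        simp [h2]
      by_cases hxm : x ∈ t.dropWhile (· == c)
      · simp [hxm, hmemiff.mpr hxm, hct]
      · have : x ∉ (c :: t) := fun h => hxm (hmemiff.mp h)
        simp [hxm, this, PySem.Dict.getD_insert, hxc]

-- a value of d.insert is an old value of d or the inserted one
lemma pvValues_insert (d : PySem.Dict String Int) (k : String) (w v : Int)
    (h : v ∈ (d.insert k w).values) : v ∈ d.values ∨ v = w := by
  by_cases hk : d.contains k
  · simp only [PySem.Dict.insert, hk, if_true, PySem.Dict.values, List.map_map,
      List.mem_map] at h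
    rcases h with ⟨p, hp, hv⟩
    by_cases hpk : p.1 = k
    · right
      simp [hpk] at hv
      omega
    · left
      simp [hpk] at hv
      exact List.mem_map.mpr ⟨p, hp, hv⟩
  · rw [Bool.not_eq_true] at hk
    simp only [PySem.Dict.insert, hk, Bool.false_eq_true, if_false, PySem.Dict.values,
      List.map_append, List.mem_append] at h
    rcases h with h | h
    · left; exact h
    · right; simpa using h

-- every value produced by the run-length fold is a multiplicity of a member
lemma pvRLE_values_sub (s : List String) (d : PySem.Dict String Int) :
    ∀ (v : Int),
      s.Pairwise (· ≤ ·) → v ∈ (pvRLE s d).values →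
      v ∈ d.values ∨ ∃ c, c ∈ s ∧ v = (s.count c : Int) := by
  induction s, d using pvRLE.induct with
  | case1 d => intro v _ h; left; simpa [pvRLE] using h
  | case2 d c t ih =>
    intro v hp hv
    have hle : ∀ y ∈ t, c ≤ y := (List.pairwise_cons.mp hp).1
    have ht : t.Pairwise (· ≤ ·) := (List.pairwise_cons.mp hp).2
    have ht2 : (t.dropWhile (· == c)).Pairwise (· ≤ ·) :=
      ht.sublist (List.dropWhile_sublist _)
    have hcnot : c ∉ t.dropWhile (· == c) := pvNotMemDrop c t hle ht
    have htake : ∀ y ∈ t.takeWhile (· == c), y = c := by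
      intro y hy
      have := List.mem_takeWhile_imp hy
      simpa using this
    have hsplit : t.takeWhile (· == c) ++ t.dropWhile (· == c) = t :=
      List.takeWhile_append_dropWhile
    rw [pvRLE] at hv
    rcases ih v ht2 hv with h | ⟨c', hc', hcv⟩
    · rcases pvValues_insert _ _ _ _ h with h | h
      · left; exact h
      · right
        refine ⟨c, by simp, ?_⟩
        have hcount2 : (t.dropWhile (· == c)).count c = 0 := List.count_eq_zero.mpr hcnot
        have hcount1 : (t.takeWhile (· == c)).count c = (t.takeWhile (· == c)).length :=
          List.count_eq_length.mpr (fun b hb => by simp [htake b hb])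
        have hct : t.count c = (t.takeWhile (· == c)).length := by
          calc t.count c = ((t.takeWhile (· == c)) ++ (t.dropWhile (· == c))).count c := by
                rw [hsplit]
            _ = (t.takeWhile (· == c)).length := by
                rw [List.count_append, hcount1, hcount2]
                omega
        rw [h]
        simp [List.count_cons_self, hct]
        omega
    · right
      have hne : c' ≠ c := fun h => hcnot (h ▸ hc')
      have hnt1 : c' ∉ t.takeWhile (· == c) := fun h => hne (htake c' h)
      have hmem : c' ∈ (c :: t) := by
        refine List.mem_cons.mpr (Or.inr ?_)
        rw [← hsplit]
        exact List.mem_append.mpr (Or.inr hc')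
      refine ⟨c', hmem, ?_⟩
      have hcount1 : (t.takeWhile (· == c)).count c' = 0 := List.count_eq_zero.mpr hnt1
      have hct : (c :: t).count c' = (t.dropWhile (· == c)).count c' := by
        have h1 : t.count c' = (t.dropWhile (· == c)).count c' := by
          conv_lhs => rw [← hsplit]
          rw [List.count_append, hcount1]
          omega
        have h2 : c ≠ c' := fun h => hne h.symm
        rw [List.count_cons, h1]
        simp [h2]
      rw [hcv, hct]

-- a successful non-default lookup value is among the dict's values
lemma pvGetD_mem_values (d : PySem.Dict String Int) (k : String)
    (h : d.getD k 0 ≠ 0) : d.getD k 0 ∈ d.values := by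
  cases hg : d.get? k with
  | none => simp [PySem.Dict.getD, hg] at h
  | some v =>
    have hv : d.getD k 0 = v := by simp [PySem.Dict.getD, hg]
    rw [hv]
    simp only [PySem.Dict.get?] at hg
    rcases Option.map_eq_some_iff.mp hg with ⟨p, hp, hpv⟩
    exact hpv ▸ List.mem_map.mpr ⟨p, List.mem_of_find?_eq_some hp, rfl⟩

-- ===== VERDICT (by name: the statement is the Claim_ definition above) =====
theorem get_priority_focus_py_spec : Claim_equal_get_priority_focus_py := by
  intro nodes _ _
  unfold Spec_get_priority_focus_py get_priority_focus_py get_priority_focus_py_alt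
  by_cases hnil : nodes = []
  · simp [hnil]
  · simp only [hnil, if_false]
    -- names
    set cats := nodes.map pvCat with hcats
    set f : String → Int := fun k => (cats.count k : Int) with hf
    set s := PySem.List.sorted cats (fun x => x) false with hsdef
    set counts := pvRLE s PySem.Dict.empty with hcounts
    have hcatsne : cats ≠ [] := by
      intro h
      exact hnil (List.map_eq_nil_iff.mp (hcats ▸ h))
    have hperm : s.Perm cats := PySem.List.sorted_perm cats (fun x => x) false
    have hpair : s.Pairwise (· ≤ ·) := by
      have := PySem.List.sorted_pairwise cats (fun x => x)
      simpa using this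
    have hscount : ∀ x, s.count x = cats.count x := fun x => hperm.count_eq x
    have hsmem : ∀ x, x ∈ s ↔ x ∈ cats := fun x => hperm.mem_iff
    -- A reduces to max? over the ordered dedup of cats, keyed by multiplicity
    have hfold : nodes.foldl
        (fun d node =>
          let cat := pvCat node
          d.insert cat (d.getD cat 0 + 1))
        (PySem.Dict.empty : PySem.Dict String Int)
        = PySem.Dict.counter cats := by
      have h := PySem.Dict.foldl_insert_getD_add_one_eq_counter cats
      rw [hcats, List.foldl_map] at h
      exact h
    rw [hfold, PySem.Dict.items_counter,
      max?_map_pair (PySem.Set.ofList cats) f]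
    -- max? over the dedup exists
    have hDne : PySem.Set.ofList cats ≠ [] := by
      cases hc : cats with
      | nil => exact absurd hc hcatsne
      | cons y t =>
        intro hD
        have hy : y ∈ PySem.Set.ofList (y :: t) :=
          (PySem.Set.mem_ofList (y :: t) y).mpr (by simp)
        rw [hD] at hy
        simp at hy
    obtain ⟨a, ha⟩ : ∃ a, PySem.List.max? (PySem.Set.ofList cats) f = some a := by
      cases hm : PySem.List.max? (PySem.Set.ofList cats) f with
      | none => exact absurd ((PySem.List.max?_eq_none_iff _ _).mp hm) hDne
      | some a => exact ⟨a, rfl⟩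
    have hamem : a ∈ cats := (PySem.Set.mem_ofList cats a).mp (PySem.List.max?_mem ha)
    have hamax : ∀ y ∈ cats, f y ≤ f a := fun y hy =>
      PySem.List.max?_isMax ha y ((PySem.Set.mem_ofList cats y).mpr hy)
    rw [ha]
    -- the lookup table agrees with multiplicity on members of cats
    have hgetD : ∀ x ∈ cats, counts.getD x 0 = f x := by
      intro x hx
      rw [hcounts, pvRLE_getD s PySem.Dict.empty x hpair]
      simp [(hsmem x).mpr hx, hscount x, hf]
    -- f a is a value of counts
    have hfa_pos : (0 : Int) < f a := by
      have : 0 < cats.count a := List.count_pos_iff.mpr hamem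
      simp [hf]
      omega
    have hfa_val : f a ∈ counts.values := by
      have h := hgetD a hamem
      have : counts.getD a 0 ≠ 0 := by rw [h]; omega
      have hv := pvGetD_mem_values counts a this
      rwa [h] at hv
    -- hence max? over values exists and equals f a
    obtain ⟨M, hM⟩ : ∃ M, PySem.List.max? counts.values (fun v => v) = some M := by
      cases hm : PySem.List.max? counts.values (fun v => v) with
      | none =>
        have : counts.values = [] := (PySem.List.max?_eq_none_iff _ _).mp hm
        rw [this] at hfa_val
        simp at hfa_val
      | some M => exact ⟨M, rfl⟩
    have hMfa : M = f a := by
      have h1 : f a ≤ M := PySem.List.max?_isMax hM (f a) hfa_val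
      have hMmem : M ∈ counts.values := PySem.List.max?_mem hM
      have h2 : M ≤ f a := by
        rcases pvRLE_values_sub s PySem.Dict.empty M hpair (hcounts ▸ hMmem) with h | ⟨c, hc, hcv⟩
        · simp [PySem.Dict.values, PySem.Dict.empty] at h
        · have : M = f c := by rw [hcv, hf]; simp [hscount c]
          rw [this]
          exact hamax c ((hsmem c).mp hc)
      omega
    rw [hM]
    -- the scan over cats finds exactly a
    have hpred : ∀ x ∈ cats, (counts.getD x 0 == M) = decide (f a ≤ f x) := by
      intro x hx
      rw [hgetD x hx, hMfa]
      have hle := hamax x hx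
      by_cases h : f x = f a
      · simp [h]
      · have : ¬ f a ≤ f x := by omega
        simp [h, this]
    have hfind : cats.find? (fun c => counts.getD c 0 == M) = some a := by
      rw [pvFind?_congr _ _ cats hpred]
      have h1 : (PySem.List.dedup cats).find? (fun y => decide (f a ≤ f y)) = some a := by
        rw [PySem.List.dedup_eq_ofList]
        exact pvMax?_find f (PySem.Set.ofList cats) a ha
      rw [← pvFind?_dedup]
      exact h1
    simp [hfind]
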